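-- pv_equiv track=rewrite | github.com/epaillas/drift | scripts/plot_correlation_matrix_pqq.py | _pair_block_edges
-- ===== SOURCE A (Python) =====
-- def _pair_block_edges(pair_order, block_sizes, ells):
--     if len(pair_order) * len(ells) != len(block_sizes):
--         raise ValueError("block_sizes must contain one entry per pair-ell block.")
--     edges = []
--     offset = 0
--     for idx in range(len(pair_order)):
--         pair_size = sum(block_sizes[idx * len(ells):(idx + 1) * len(ells)])
--         offset += pair_size
--         edges.append(offset)
--     return edges[:-1]
-- ===== SOURCE B (Python) =====
-- def _pair_block_edges(pair_order, block_sizes, ells):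
--     if len(pair_order) * len(ells) != len(block_sizes):
--         raise ValueError("block_sizes must contain one entry per pair-ell block.")
--     prefix = [0]
--     total = 0
--     for b in block_sizes:
--         total += b
--         prefix.append(total)
--     return [prefix[(i + 1) * len(ells)] for i in range(len(pair_order) - 1)]
-- ===== Notes on version B (the rewrite author's own statement) =====
-- stated objective: alternative
-- what changed: Replaces the per-pair slice-and-sum loop (re-summing len(ells) entries for each pair and trimming with edges[:-1]) by a single prefix-sum table over all block_sizes that is then sampled at the pair boundaries (i+1)*len(ells).
import Mathlib
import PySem

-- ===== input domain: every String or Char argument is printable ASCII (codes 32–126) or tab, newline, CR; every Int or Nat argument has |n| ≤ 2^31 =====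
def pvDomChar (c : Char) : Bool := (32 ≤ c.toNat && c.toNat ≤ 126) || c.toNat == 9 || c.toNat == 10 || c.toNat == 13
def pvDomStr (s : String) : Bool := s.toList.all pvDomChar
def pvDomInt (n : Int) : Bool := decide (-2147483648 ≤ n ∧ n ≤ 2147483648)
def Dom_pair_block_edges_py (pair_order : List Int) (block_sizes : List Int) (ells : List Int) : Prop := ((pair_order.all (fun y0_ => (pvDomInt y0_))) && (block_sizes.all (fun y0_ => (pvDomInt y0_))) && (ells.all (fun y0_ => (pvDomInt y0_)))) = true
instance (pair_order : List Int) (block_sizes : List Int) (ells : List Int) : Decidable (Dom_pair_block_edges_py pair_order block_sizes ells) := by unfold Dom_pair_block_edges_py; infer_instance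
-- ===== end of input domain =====

-- ===== PORT A =====
-- B replaces A's per-pair slice-and-sum loop by one prefix-sum table sampled at pair boundaries (alternative decomposition, same cost).
def pair_block_edges_py (pair_order : List Int) (block_sizes : List Int) (ells : List Int) : List Int :=
  -- for idx in range(len(pair_order)): pair_size = sum(block_sizes[idx*E:(idx+1)*E]); offset += pair_size; edges.append(offset)
  let st := (PySem.List.pyRange 0 (pair_order.length : Int) 1).foldl
    (fun (st : List Int × Int) idx =>
      let pair_size := (PySem.List.slice block_sizes (some (idx * (ells.length : Int)))
        (some ((idx + 1) * (ells.length : Int)))).sum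
      let offset := st.2 + pair_size
      (st.1 ++ [offset], offset)) ([], 0)
  PySem.List.slice st.1 none (some (-1))  -- edges[:-1]

-- ===== PORT B =====
def pair_block_edges_py_alt (pair_order : List Int) (block_sizes : List Int) (ells : List Int) : List Int :=
  -- prefix = [0]; total = 0; for b in block_sizes: total += b; prefix.append(total)
  let pt := block_sizes.foldl
    (fun (pt : List Int × Int) b =>
      let total := pt.2 + b
      (pt.1 ++ [total], total)) ([0], 0)
  -- [prefix[(i+1)*len(ells)] for i in range(len(pair_order)-1)]
  -- the index (i+1)*len(ells) is always in range under Pre_, so pyGetD's default is never used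
  (PySem.List.pyRange 0 ((pair_order.length : Int) - 1) 1).map
    (fun i => PySem.List.pyGetD pt.1 ((i + 1) * (ells.length : Int)) 0)

-- ===== PRECONDITION & SPEC =====
-- Pre_: exactly A's explicit guard; on other inputs A raises ValueError.
def Pre_pair_block_edges_py (pair_order : List Int) (block_sizes : List Int) (ells : List Int) : Prop :=
  pair_order.length * ells.length = block_sizes.length
instance (pair_order : List Int) (block_sizes : List Int) (ells : List Int) : Decidable (Pre_pair_block_edges_py pair_order block_sizes ells) := by unfold Pre_pair_block_edges_py; infer_instance
def pvWitness_pair_block_edges_py : List Int × List Int × List Int := ([1, 2, 3], ([1, 2, 3, 4, 5, 6], [7, 8]))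

def Spec_pair_block_edges_py (pair_order : List Int) (block_sizes : List Int) (ells : List Int) (out : List Int) : Prop := out = pair_block_edges_py_alt pair_order block_sizes ells
instance (pair_order : List Int) (block_sizes : List Int) (ells : List Int) (out : List Int) : Decidable (Spec_pair_block_edges_py pair_order block_sizes ells out) := by unfold Spec_pair_block_edges_py; infer_instance

-- ===== CLAIM (what is proved, stated in full; the proofs are below) =====
def Claim_equal_pair_block_edges_py : Prop := ∀ (pair_order : List Int) (block_sizes : List Int) (ells : List Int), Dom_pair_block_edges_py pair_order block_sizes ells → Pre_pair_block_edges_py pair_order block_sizes ells → Spec_pair_block_edges_py pair_order block_sizes ells (pair_block_edges_py pair_order block_sizes ells)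

-- ===== LEMMAS AND PROOFS =====

-- sum of the k-th length-E slice bridges consecutive prefix sums
theorem pv_slice_sum (bs : List Int) (E k : Nat) :
    ((bs.take (k * E)).sum)
      + (PySem.List.slice bs (some ((k : Int) * (E : Int))) (some (((k : Int) + 1) * (E : Int)))).sum
      = (bs.take ((k + 1) * E)).sum := by
  have h1 : (k : Int) * (E : Int) = ((k * E : Nat) : Int) := by push_cast; ring
  have h2 : ((k : Int) + 1) * (E : Int) = (((k + 1) * E : Nat) : Int) := by push_cast; ring
  rw [h1, h2, PySem.List.slice_natCast]
  have h3 : (k + 1) * E = k * E + E := by ring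
  have h4 : (k + 1) * E - k * E = E := by rw [h3, Nat.add_sub_cancel_left]
  rw [h4, h3, List.take_add, List.sum_append]

-- A's loop invariant
theorem pv_loopA (bs ells : List Int) (n : Nat) : ∀ (k : Nat) (es : List Int),
    (PySem.List.pyRange (k : Int) ((k : Int) + (n : Int)) 1).foldl
      (fun (st : List Int × Int) idx =>
        let pair_size := (PySem.List.slice bs (some (idx * (ells.length : Int)))
          (some ((idx + 1) * (ells.length : Int)))).sum
        let offset := st.2 + pair_size
        (st.1 ++ [offset], offset)) (es, (bs.take (k * ells.length)).sum)
    = (es ++ (List.range n).map (fun j => (bs.take ((k + j + 1) * ells.length)).sum),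
        (bs.take ((k + n) * ells.length)).sum) := by
  induction n with
  | zero =>
      intro k es
      rw [PySem.List.pyRange_one_eq_nil (by omega)]
      simp
  | succ m ih =>
      intro k es
      rw [PySem.List.pyRange_one_cons (by push_cast; omega)]
      simp only [List.foldl_cons]
      have hcast : (k : Int) + 1 = ((k + 1 : Nat) : Int) := by push_cast; ring
      have hcast2 : (k : Int) + ((m : Nat) + 1 : Nat) = ((k + 1 : Nat) : Int) + (m : Int) := by
        push_cast; ring
      rw [pv_slice_sum bs ells.length k]
      rw [hcast2, hcast, ih (k + 1) (es ++ [(bs.take ((k + 1) * ells.length)).sum])]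
      rw [Prod.mk.injEq]
      constructor
      · rw [List.append_assoc, List.singleton_append, List.range_succ_eq_map, List.map_cons,
          List.map_map]
        congr 1
        congr 1
        apply List.map_congr_left
        intro j _
        simp only [Function.comp_apply, Nat.succ_eq_add_one]
        have e2 : k + 1 + j + 1 = k + (j + 1) + 1 := by omega
        rw [e2]
      · have e1 : k + 1 + m = k + (m + 1) := by omega
        rw [e1]

-- B's prefix-building loop
theorem pv_loopB (bs : List Int) : ∀ (es : List Int) (c : Int),
    bs.foldl (fun (pt : List Int × Int) b =>
        let total := pt.2 + b
        (pt.1 ++ [total], total)) (es, c)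
    = (es ++ (List.range bs.length).map (fun j => c + (bs.take (j + 1)).sum), c + bs.sum) := by
  induction bs with
  | nil => intro es c; simp
  | cons x xs ih =>
      intro es c
      simp only [List.foldl_cons]
      rw [ih (es ++ [c + x]) (c + x)]
      rw [Prod.mk.injEq]
      constructor
      · rw [List.append_assoc, List.singleton_append, List.length_cons, List.range_succ_eq_map,
          List.map_cons, List.map_map]
        congr 1
        congr 1
        · simp
        · apply List.map_congr_left
          intro j _
          simp only [Function.comp_apply, List.take_succ_cons, List.sum_cons]
          ring
      · simp [List.sum_cons]; ring

-- reading the prefix table at a natural index m ≤ len gives the m-th prefix sum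
theorem pv_prefix_get (bs : List Int) (m : Nat) (hm : m ≤ bs.length) :
    (0 :: (List.range bs.length).map (fun j => (bs.take (j + 1)).sum)).getD m 0
      = (bs.take m).sum := by
  cases m with
  | zero => simp
  | succ j =>
      have hj : j < bs.length := by omega
      simp [List.getD, hj]

theorem pair_block_edges_py_eq (pair_order bs ells : List Int)
    (h : pair_order.length * ells.length = bs.length) :
    pair_block_edges_py pair_order bs ells = pair_block_edges_py_alt pair_order bs ells := by
  unfold pair_block_edges_py pair_block_edges_py_alt
  -- evaluate A's loop
  have hA := pv_loopA bs ells pair_order.length 0 []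
  simp only [Nat.cast_zero, zero_add, Nat.zero_mul, List.take_zero, List.sum_nil,
    List.nil_append] at hA
  rw [hA, PySem.List.slice_to_neg_one]
  -- evaluate B's loop
  rw [pv_loopB bs [0] 0]
  simp only [List.singleton_append]
  -- both are maps over range (n - 1)
  have hzero : ∀ j, (0 : Int) + (bs.take (j + 1)).sum = (bs.take (j + 1)).sum := by
    intro j; ring
  simp only [hzero]
  cases hn : pair_order.length with
  | zero =>
      simp only [hn] at *
      rw [PySem.List.pyRange_one_eq_nil (by norm_num)]
      simp
  | succ m =>
      -- A side: dropLast of map over range (m+1) = map over range m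
      rw [List.range_succ]
      simp only [List.map_append, List.map_cons, List.map_nil, List.dropLast_concat]
      -- B side: pyRange 0 (m+1-1) 1 = range m, indices in range
      have hb : ((m + 1 : Nat) : Int) - 1 = ((m : Nat) : Int) := by push_cast; ring
      rw [hb, PySem.List.pyRange_zero_natCast]
      rw [List.map_map]
      apply List.map_congr_left
      intro j hj
      simp only [Function.comp]
      have hj' : j < m := List.mem_range.mp hj
      have hidx : ((j : Int) + 1) * (ells.length : Int) = (((j + 1) * ells.length : Nat) : Int) := by
        push_cast; ring
      rw [hidx, PySem.List.pyGetD_natCast]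
      rw [pv_prefix_get bs ((j + 1) * ells.length) (by
        calc (j + 1) * ells.length ≤ (m + 1) * ells.length := by
              apply Nat.mul_le_mul_right; omega
          _ = bs.length := by rw [← h, hn])]

-- ===== VERDICT (by name: the statement is the Claim_ definition above) =====
theorem pair_block_edges_py_spec : Claim_equal_pair_block_edges_py := by
  intro pair_order block_sizes ells _ hpre
  unfold Spec_pair_block_edges_py
  exact pair_block_edges_py_eq pair_order block_sizes ells hpre
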